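-- pv_equiv track=rewrite | github.com/srinjoychakravarty/hackerrank | 5.py | overlapPrefix
-- ===== SOURCE A (Python) =====
-- def overlapPrefix(l):
--     length = len(l)
--     complete_array = []
--     for i in range(length):
--         total = 0
--         string = l[i]
--         characters_in_string = len(string)
--
--         for j in range(characters_in_string):
--             suffix = string[j:]
--             length_of_suffix = len(suffix)
--             overlap = 0
--
--             for k in range(length_of_suffix):
--                 if(string[k] == suffix[k]):
--                     overlap = overlap + 1
--                 else:
--                     break
--             total = total + overlap
--
--         complete_array.append(total)
--
--
--     return complete_array
-- ===== SOURCE B (Python) =====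
-- def overlapPrefix(l):
--     res = []
--     for s in l:
--         n = len(s)
--         alive = list(range(n))
--         total = 0
--         d = 0
--         while alive:
--             alive = [j for j in alive if j + d < n and s[j + d] == s[d]]
--             total += len(alive)
--             d += 1
--         res.append(total)
--     return res
-- ===== Notes on version B (the rewrite author's own statement) =====
-- stated objective: alternative
-- what changed: A scans row-wise, re-slicing each suffix and comparing it to the string until the first mismatch; B transposes the traversal: a single sweep over match depth d that maintains the list of still-alive suffix start positions, filters it by one character comparison per survivor, and adds the survivor count to the total each round.
import Mathlib
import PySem

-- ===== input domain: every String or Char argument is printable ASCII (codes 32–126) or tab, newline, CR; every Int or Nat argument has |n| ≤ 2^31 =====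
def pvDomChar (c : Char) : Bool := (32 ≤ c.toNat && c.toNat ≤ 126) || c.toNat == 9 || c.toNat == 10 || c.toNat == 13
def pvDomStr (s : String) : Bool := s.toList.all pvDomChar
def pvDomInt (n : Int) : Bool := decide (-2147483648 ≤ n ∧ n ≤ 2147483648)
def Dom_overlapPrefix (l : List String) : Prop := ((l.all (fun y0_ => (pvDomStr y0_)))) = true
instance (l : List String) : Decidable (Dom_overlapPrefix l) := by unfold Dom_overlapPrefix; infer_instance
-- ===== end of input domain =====

-- B transposes A's per-suffix scans: one sweep over match depth d keeping the list of still-alive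
-- suffix starts and adding its size; objective: alternative traversal (same worst case, prunes early).

-- ===== PORT A =====
-- Strings are handled through .toList (PySem string ops are defined on List Char).
-- The inner 'for k … break' loop is the fold of pvStepA over range(len(suffix)) with a 'broken' flag.
def pvStepA (string suffix : List Char) (st : Int × Bool) (k : Int) : Int × Bool :=
  if st.2 then st
  else if PySem.List.pyGetD string k ' ' = PySem.List.pyGetD suffix k ' ' then
    (st.1 + 1, st.2)
  else (st.1, true)

def overlapPrefix (l : List String) : List Int :=
  (PySem.List.pyRange 0 (PySem.List.len l) 1).foldl (fun complete_array i =>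
    let string := (PySem.List.pyGetD l i "").toList
    let total := (PySem.List.pyRange 0 (PySem.List.len string) 1).foldl (fun total j =>
      let suffix := PySem.List.slice string (some j) none
      let overlap := ((PySem.List.pyRange 0 (PySem.List.len suffix) 1).foldl
        (pvStepA string suffix) (0, false)).1
      total + overlap) 0
    complete_array ++ [total]) []

-- ===== PORT B =====
-- the list comprehension '[j for j in alive if j + d < n and s[j + d] == s[d]]'
def pvAliveStep (s : List Char) (alive : List Nat) (d : Nat) : List Nat :=
  alive.filter (fun j => decide (j + d < s.length) && (s.getD (j + d) ' ' == s.getD d ' '))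

-- the 'while alive:' loop; it runs at most len(s)+1 times, so that fuel makes it total
def pvLoop (s : List Char) : List Nat → Nat → Nat → Int
  | [], _, _ => 0
  | _ :: _, _, 0 => 0
  | j :: js, d, fuel + 1 =>
    let kept := pvAliveStep s (j :: js) d
    (kept.length : Int) + pvLoop s kept (d + 1) fuel

def overlapPrefix_alt (l : List String) : List Int :=
  l.map (fun s => pvLoop s.toList (List.range s.toList.length) 0 (s.toList.length + 1))

-- ===== PRECONDITION & SPEC =====
def Spec_overlapPrefix (l : List String) (out : List Int) : Prop := out = overlapPrefix_alt l
instance (l : List String) (out : List Int) : Decidable (Spec_overlapPrefix l out) := by unfold Spec_overlapPrefix; infer_instance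

-- ===== CLAIM (what is proved, stated in full; the proofs are below) =====
def Claim_equal_overlapPrefix : Prop := ∀ (l : List String), Dom_overlapPrefix l → Spec_overlapPrefix l (overlapPrefix l)

-- ===== LEMMAS AND PROOFS =====

-- reference function: length of the longest common prefix of two lists
def lcpZ : List Char → List Char → Nat
  | a :: as, b :: bs => if a = b then lcpZ as bs + 1 else 0
  | _, _ => 0

lemma lcpZ_nil_right (x : List Char) : lcpZ x [] = 0 := by cases x <;> rfl

lemma lcpZ_le (x : List Char) : ∀ y, lcpZ x y ≤ y.length := by
  induction x with
  | nil => intro y; simp [lcpZ]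
  | cons a as ih =>
    intro y
    cases y with
    | nil => simp [lcpZ]
    | cons b bs =>
      by_cases h : a = b
      · simpa [lcpZ, h] using ih bs
      · simp [lcpZ, h]

lemma lcpZ_succ_iff (x : List Char) : ∀ (y : List Char) (d : Nat), d ≤ lcpZ x y →
    (d + 1 ≤ lcpZ x y ↔ d < x.length ∧ d < y.length ∧ x[d]? = y[d]?) := by
  induction x with
  | nil => intro y d h; simp [lcpZ] at h; simp [lcpZ, h]
  | cons a as ih =>
    intro y d h
    cases y with
    | nil => simp [lcpZ] at h; simp [lcpZ, h]
    | cons b bs =>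
      by_cases hab : a = b
      · cases d with
        | zero => simp [lcpZ, hab]
        | succ e =>
          have he : e ≤ lcpZ as bs := by simp [lcpZ, hab] at h; omega
          have := ih bs e he
          simp [lcpZ, hab]
          constructor
          · intro hle; exact (this.mp (by omega)).imp id (fun ⟨h1, h2⟩ => ⟨h1, h2⟩)
          · intro ⟨h1, h2, h3⟩; have := this.mpr ⟨h1, h2, h3⟩; omega
      · have hd : d = 0 := by simp [lcpZ, hab] at h; omega
        subst hd
        simp [lcpZ, hab]

-- ---- A side: the break-loop computes lcp, the middle loop sums it over suffixes ----

def pvLcp : List (Char × Char) → Int → Int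
  | [], n => n
  | p :: rest, n => if p.1 ≠ p.2 then n else pvLcp rest (n + 1)

def pvSufSum (s : List Char) : List Char → Int
  | [] => 0
  | c :: rest => pvLcp (s.zip (c :: rest)) 0 + pvSufSum s rest

-- once the break flag is set, the fold does nothing
lemma pvStepA_skip (string suffix : List Char) (ks : List Int) (v : Int) :
    ks.foldl (pvStepA string suffix) (v, true) = (v, true) := by
  induction ks with
  | nil => rfl
  | cons k ks ih => simpa [pvStepA] using ih

-- A's break-loop over indices a..len(suffix) computes the zip-lcp on the dropped tails
lemma pvStepA_lcp (fuel : Nat) : ∀ (string suffix : List Char) (a : Nat) (v : Int),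
    suffix.length - a ≤ fuel → suffix.length ≤ string.length →
    ((PySem.List.pyRange (a : Int) (suffix.length : Int) 1).foldl
        (pvStepA string suffix) (v, false)).1
      = pvLcp ((string.drop a).zip (suffix.drop a)) v := by
  induction fuel with
  | zero =>
    intro string suffix a v hf _
    have ha : suffix.length ≤ a := by omega
    rw [PySem.List.pyRange_one_eq_nil (by exact_mod_cast ha)]
    simp [List.drop_eq_nil_of_le ha, pvLcp]
  | succ fuel ih =>
    intro string suffix a v hf hlen
    by_cases ha : suffix.length ≤ a
    · rw [PySem.List.pyRange_one_eq_nil (by exact_mod_cast ha)]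
      simp [List.drop_eq_nil_of_le ha, pvLcp]
    · have ha' : a < suffix.length := by omega
      have has : a < string.length := by omega
      rw [PySem.List.pyRange_one_cons (by exact_mod_cast ha')]
      rw [List.drop_eq_getElem_cons ha', List.drop_eq_getElem_cons has]
      simp only [List.foldl_cons, List.zip_cons_cons]
      by_cases heq : string[a] = suffix[a]
      · have hstep : pvStepA string suffix (v, false) (a : Int) = (v + 1, false) := by
          simp [pvStepA, PySem.List.pyGetD_natCast, List.getD_eq_getElem?_getD,
            List.getElem?_eq_getElem ha', List.getElem?_eq_getElem has, heq]
        rw [hstep]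
        have hcast : ((a : Int) + 1) = ((a + 1 : Nat) : Int) := by push_cast; ring
        rw [hcast, ih string suffix (a + 1) (v + 1) (by omega) hlen]
        simp [pvLcp, heq]
      · have hstep : pvStepA string suffix (v, false) (a : Int) = (v, true) := by
          simp [pvStepA, PySem.List.pyGetD_natCast, List.getD_eq_getElem?_getD,
            List.getElem?_eq_getElem ha', List.getElem?_eq_getElem has, heq]
        rw [hstep, pvStepA_skip]
        simp [pvLcp, heq]

-- A's middle loop over j = a..len(cs) accumulates the suffix-tail sum of cs.drop a
lemma pvMiddle_sufSum (fuel : Nat) : ∀ (cs : List Char) (a : Nat) (acc : Int),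
    cs.length - a ≤ fuel →
    (PySem.List.pyRange (a : Int) (cs.length : Int) 1).foldl (fun total j =>
        let suffix := PySem.List.slice cs (some j) none
        let overlap := ((PySem.List.pyRange 0 (PySem.List.len suffix) 1).foldl
          (pvStepA cs suffix) (0, false)).1
        total + overlap) acc
      = acc + pvSufSum cs (cs.drop a) := by
  induction fuel with
  | zero =>
    intro cs a acc hf
    have ha : cs.length ≤ a := by omega
    rw [PySem.List.pyRange_one_eq_nil (by exact_mod_cast ha)]
    simp [List.drop_eq_nil_of_le ha, pvSufSum]
  | succ fuel ih =>
    intro cs a acc hf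
    by_cases ha : cs.length ≤ a
    · rw [PySem.List.pyRange_one_eq_nil (by exact_mod_cast ha)]
      simp [List.drop_eq_nil_of_le ha, pvSufSum]
    · have ha' : a < cs.length := by omega
      rw [PySem.List.pyRange_one_cons (by exact_mod_cast ha')]
      simp only [List.foldl_cons]
      have hslice : PySem.List.slice cs (some (a : Int)) none = cs.drop a :=
        PySem.List.slice_from_natCast cs a
      have hlcp := pvStepA_lcp (cs.drop a).length cs (cs.drop a) 0 0
        (by omega) (by simp)
      simp only [List.drop_zero, Nat.cast_zero] at hlcp
      have hcast : ((a : Int) + 1) = ((a + 1 : Nat) : Int) := by push_cast; ring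
      rw [hcast, ih cs (a + 1) _ (by omega)]
      have hdrop : cs.drop a = cs[a] :: cs.drop (a + 1) := List.drop_eq_getElem_cons ha'
      simp only [hslice, PySem.List.len]
      rw [hlcp]
      rw [hdrop]
      simp [pvSufSum, ← hdrop]
      ring

-- the zip-lcp is lcpZ
lemma pvLcp_lcpZ (x : List Char) : ∀ (y : List Char) (v : Int),
    pvLcp (x.zip y) v = v + (lcpZ x y : Int) := by
  induction x with
  | nil => intro y v; simp [pvLcp, lcpZ]
  | cons a as ih =>
    intro y v
    cases y with
    | nil => simp [pvLcp, lcpZ_nil_right]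
    | cons b bs =>
      by_cases h : a = b
      · simp [pvLcp, lcpZ, h, ih bs (v + 1)]; ring
      · simp [pvLcp, lcpZ, h]

-- the suffix-tail sum is the sum of lcpZ over all drop positions
lemma pvSufSum_eq (s : List Char) : ∀ (t : List Char),
    pvSufSum s t = ((List.range t.length).map (fun i => (lcpZ s (t.drop i) : Int))).sum := by
  intro t
  induction t with
  | nil => simp [pvSufSum]
  | cons c rest ih =>
    simp only [pvSufSum, pvLcp_lcpZ, List.length_cons, List.range_succ_eq_map,
      List.map_cons, List.map_map, List.sum_cons, List.drop_zero, ih]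
    have hm : (List.range rest.length).map
          ((fun i => (lcpZ s ((c :: rest).drop i) : Int)) ∘ Nat.succ)
        = (List.range rest.length).map (fun i => (lcpZ s (rest.drop i) : Int)) :=
      List.map_congr_left (fun i _ => by simp [Function.comp])
    rw [hm]
    ring

-- per-string totals of A equal the lcpZ sum
lemma pvTotalA_eq (s : String) :
    (PySem.List.pyRange 0 (PySem.List.len s.toList) 1).foldl (fun total j =>
        let suffix := PySem.List.slice s.toList (some j) none
        let overlap := ((PySem.List.pyRange 0 (PySem.List.len suffix) 1).foldl
          (pvStepA s.toList suffix) (0, false)).1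
        total + overlap) 0
      = ((List.range s.toList.length).map
          (fun i => (lcpZ s.toList (s.toList.drop i) : Int))).sum := by
  have h := pvMiddle_sufSum s.toList.length s.toList 0 0 (by omega)
  simp only [PySem.List.len] at h ⊢
  rw [show ((0 : Nat) : Int) = (0 : Int) from rfl] at h
  simpa [pvSufSum_eq] using h

-- ---- B side ----

-- dropped elements contribute 0
lemma sum_filter_zero (f : Nat → Int) (p : Nat → Bool) (l : List Nat)
    (h : ∀ j ∈ l, p j = true ∨ f j = 0) :
    ((l.filter p).map f).sum = (l.map f).sum := by
  induction l with
  | nil => rfl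
  | cons a t ih =>
    have ht := ih (fun j hj => h j (List.mem_cons_of_mem a hj))
    rcases h a List.mem_cons_self with hp | hz
    · simp [hp, ht]
    · by_cases hp : p a <;> simp [hp, ht, hz]

-- the comprehension's condition decides 'lcp exceeds d' for still-alive j
lemma pvAliveStep_eq (s : List Char) (d : Nat) (j : Nat)
    (hj : j < s.length) (hd : d ≤ lcpZ s (s.drop j)) :
    (decide (j + d < s.length) && (s.getD (j + d) ' ' == s.getD d ' '))
      = decide (d + 1 ≤ lcpZ s (s.drop j)) := by
  have hiff := lcpZ_succ_iff s (s.drop j) d hd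
  by_cases hlt : j + d < s.length
  · have hds : d < s.length := by omega
    have hdy : d < (s.drop j).length := by simp [List.length_drop]; omega
    have hget : (s.drop j)[d]? = s[j + d]? := by
      rw [List.getElem?_drop]
    rw [List.getD_eq_getElem?_getD, List.getD_eq_getElem?_getD,
      List.getElem?_eq_getElem hlt, List.getElem?_eq_getElem hds]
    have hiff2 : (d + 1 ≤ lcpZ s (s.drop j)) ↔ s[j + d] = s[d] := by
      rw [hiff, hget, List.getElem?_eq_getElem hlt, List.getElem?_eq_getElem hds]
      constructor
      · rintro ⟨_, _, h⟩; exact (Option.some_inj.mp h).symm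
      · intro h; exact ⟨hds, hdy, congrArg some h.symm⟩
    rw [Bool.eq_iff_iff]
    simp [hlt, hiff2]
  · have : ¬ (d + 1 ≤ lcpZ s (s.drop j)) := by
      intro hle
      have := (hiff.mp hle).2.1
      simp [List.length_drop] at this
      omega
    simp [hlt, this]

-- the while loop sums the remaining match lengths of all alive suffix starts
lemma pvLoop_eq (s : List Char) (fuel : Nat) : ∀ (alive : List Nat) (d : Nat),
    (∀ j ∈ alive, j < s.length ∧ d ≤ lcpZ s (s.drop j)) →
    s.length + 1 - d ≤ fuel →
    pvLoop s alive d fuel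
      = (alive.map (fun j => (lcpZ s (s.drop j) : Int) - d)).sum := by
  induction fuel with
  | zero =>
    intro alive d h hf
    cases alive with
    | nil => simp [pvLoop]
    | cons j js =>
      exfalso
      obtain ⟨hj, hd⟩ := h j List.mem_cons_self
      have := lcpZ_le s (s.drop j)
      simp [List.length_drop] at this
      omega
  | succ fuel ih =>
    intro alive d h hf
    cases alive with
    | nil => simp [pvLoop]
    | cons j js =>
      obtain ⟨hj0, hd0⟩ := h j List.mem_cons_self
      have hdn : d ≤ s.length := by
        have := lcpZ_le s (s.drop j)
        simp [List.length_drop] at this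
        omega
      simp only [pvLoop]
      have hfilter : pvAliveStep s (j :: js) d
          = (j :: js).filter (fun j => decide (d + 1 ≤ lcpZ s (s.drop j))) := by
        unfold pvAliveStep
        exact List.filter_congr (fun x hx => pvAliveStep_eq s d x (h x hx).1 (h x hx).2)
      rw [hfilter]
      set kept := (j :: js).filter (fun j => decide (d + 1 ≤ lcpZ s (s.drop j))) with hkept
      have hmem : ∀ x ∈ kept, x < s.length ∧ d + 1 ≤ lcpZ s (s.drop x) := by
        intro x hx
        rw [hkept, List.mem_filter] at hx
        exact ⟨(h x hx.1).1, by simpa using hx.2⟩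
      rw [ih kept (d + 1) hmem (by omega)]
      have hsplit : (kept.map (fun x => (lcpZ s (s.drop x) : Int) - d)).sum
          = (kept.length : Int) + (kept.map (fun x => (lcpZ s (s.drop x) : Int) - (d + 1))).sum := by
        induction kept with
        | nil => simp
        | cons a t iht => simp at iht ⊢; omega
      have hzero : (kept.map (fun x => (lcpZ s (s.drop x) : Int) - d)).sum
          = ((j :: js).map (fun x => (lcpZ s (s.drop x) : Int) - d)).sum := by
        rw [hkept]
        apply sum_filter_zero
        intro x hx
        by_cases hc : d + 1 ≤ lcpZ s (s.drop x)
        · left; simpa using hc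
        · right; have := (h x hx).2; omega
      rw [← hzero, hsplit]
      push_cast
      ring

-- B's per-string value equals the lcpZ sum
lemma pvTotalB_eq (cs : List Char) :
    pvLoop cs (List.range cs.length) 0 (cs.length + 1)
      = ((List.range cs.length).map (fun i => (lcpZ cs (cs.drop i) : Int))).sum := by
  rw [pvLoop_eq cs (cs.length + 1) (List.range cs.length) 0
    (fun j hj => ⟨List.mem_range.mp hj, Nat.zero_le _⟩) (by omega)]
  simp

-- the outer append-fold of A is a map
lemma foldl_append_map (f : String → Int) (l : List String) : ∀ (acc : List Int),
    l.foldl (fun acc s => acc ++ [f s]) acc = acc ++ l.map f := by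
  induction l with
  | nil => simp
  | cons a t ih => intro acc; simp [ih]

-- ===== VERDICT (by name: the statement is the Claim_ definition above) =====
theorem overlapPrefix_spec : Claim_equal_overlapPrefix := by
  intro l _
  show overlapPrefix l = overlapPrefix_alt l
  unfold overlapPrefix overlapPrefix_alt
  simp only [pvTotalA_eq]
  exact (PySem.List.foldl_pyRange_zero_pyGetD l ""
      (fun acc s => acc ++ [((List.range s.toList.length).map
        (fun i => (lcpZ s.toList (s.toList.drop i) : Int))).sum]) []).trans
    ((foldl_append_map _ l []).trans (by
      simp only [List.nil_append]
      exact List.map_congr_left (fun a _ => (pvTotalB_eq a.toList).symm)))
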